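-- pv_equiv track=rewrite | github.com/ptyshevs/int_seq | models/mark_chain.py | create_transition_matrix
-- ===== SOURCE A (Python) =====
-- def create_transition_matrix(sequence, k):
--     # create
--
--     n = len(sequence)
--     new_sequence = list()
--     seq = [int(item) for item in sequence]
--     seq = [str(item) for item in seq]
--     for i in range(n - k + 1):
--         new_sequence.append(seq[i:i + k])
--     unique = list()
--     for item in new_sequence:
--         if item not in unique:
--             unique.append(item)
--     matrix = dict()
--     for item in unique:
--         matrix[str(item)] = 0
--     for item in unique:
--         d = dict()
--         for el in set(sequence):
--             d[str(int(el))] = 0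
--         for i in range(len(seq) - k):
--             if seq[i:i + k] == item:
--                 d[seq[i + k]] += 1
--         matrix[str(item)] = d
--     return matrix
-- ===== SOURCE B (Python) =====
-- def create_transition_matrix(sequence, k):
--     seq = [str(int(item)) for item in sequence]
--     n = len(seq)
--     states = [str(int(x)) for x in dict.fromkeys(sequence)]
--     counts = {}
--     for i in range(n - k + 1):
--         g = tuple(seq[i:i + k])
--         if g not in counts:
--             counts[g] = dict.fromkeys(states, 0)
--         if i + k < n:
--             counts[g][seq[i + k]] += 1
--     return {str(list(g)): d for g, d in counts.items()}
-- ===== Notes on version B (the rewrite author's own statement) =====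
-- stated objective: faster
-- what changed: one pass over the sequence that hashes each k-gram (as a tuple) into a dict and bumps its successor counter incrementally, instead of re-scanning and re-slicing the whole sequence once per distinct k-gram
import Mathlib
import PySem

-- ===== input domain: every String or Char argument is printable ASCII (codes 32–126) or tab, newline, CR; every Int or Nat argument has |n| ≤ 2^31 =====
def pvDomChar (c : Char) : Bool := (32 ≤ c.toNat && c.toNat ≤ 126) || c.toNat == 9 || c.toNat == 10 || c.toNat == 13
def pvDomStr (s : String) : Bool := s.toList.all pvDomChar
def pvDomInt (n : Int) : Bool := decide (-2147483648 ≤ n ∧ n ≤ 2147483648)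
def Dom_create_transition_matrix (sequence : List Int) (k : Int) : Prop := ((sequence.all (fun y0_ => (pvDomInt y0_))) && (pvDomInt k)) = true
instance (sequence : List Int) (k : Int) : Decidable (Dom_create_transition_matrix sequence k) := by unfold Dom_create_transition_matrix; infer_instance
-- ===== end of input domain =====

-- B replaces A's per-distinct-k-gram rescans of the whole sequence by one pass that hashes each
-- k-gram and bumps its successor counter incrementally (objective: faster).

-- Python's str() of a list of int-strings, e.g. str(['1', '-2']) = "['1', '-2']"
-- (exact here: the elements are str(int) strings, so they contain no quote/backslash characters).
def pyReprStrList (ss : List String) : String :=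
  String.ofList ('[' :: PySem.Chars.join [',', ' '] (ss.map (fun s => '\'' :: s.toList ++ ['\''])) ++ [']'])

-- ===== PORT A =====
-- The output type is a Python dict (compared ignoring order), so iterating set(sequence) via
-- PySem.Set.ofList (first-occurrence order) is sound here: the inner dict is only returned.
def create_transition_matrix (sequence : List Int) (k : Int) : List (String × List (String × Int)) :=
  let n : Int := sequence.length
  let seq : List String := sequence.map (fun item => PySem.Int.toStr item)  -- str(int(item)) on ints
  let new_sequence : List (List String) :=
    (PySem.List.pyRange 0 (n - k + 1) 1).foldl
      (fun acc i => acc ++ [PySem.List.slice seq (some i) (some (i + k))]) []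
  let unique : List (List String) :=
    new_sequence.foldl (fun u item => if item ∈ u then u else u ++ [item]) []
  -- matrix[str(item)] = 0 : this integer placeholder is overwritten below before it is ever read;
  -- it is ported as the placeholder [] of the value type.
  let matrix0 : PySem.Dict String (List (String × Int)) :=
    unique.foldl (fun m item => m.insert (pyReprStrList item) []) PySem.Dict.empty
  let matrix : PySem.Dict String (List (String × Int)) :=
    unique.foldl (fun m item =>
      let d0 : PySem.Dict String Int :=
        (PySem.Set.ofList sequence).foldl (fun d el => d.insert (PySem.Int.toStr el) 0) PySem.Dict.empty
      let d : PySem.Dict String Int :=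
        (PySem.List.pyRange 0 ((seq.length : Int) - k) 1).foldl
          (fun d i =>
            if PySem.List.slice seq (some i) (some (i + k)) = item then
              d.modify (PySem.List.pyGetD seq (i + k) "") 0 (· + 1)  -- d[seq[i+k]] += 1 (the key is present; the index is in range under Pre_)
            else d) d0
      m.insert (pyReprStrList item) d.items) matrix0
  matrix.items

-- ===== PORT B =====
def create_transition_matrix_alt (sequence : List Int) (k : Int) : List (String × List (String × Int)) :=
  let seq : List String := sequence.map (fun item => PySem.Int.toStr item)
  let n : Int := seq.length
  let states : List String := (PySem.List.dedup sequence).map (fun x => PySem.Int.toStr x)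
  let counts : PySem.Dict (List String) (PySem.Dict String Int) :=  -- keyed by tuple(seq[i:i+k])
    (PySem.List.pyRange 0 (n - k + 1) 1).foldl
      (fun counts i =>
        let g : List String := PySem.List.slice seq (some i) (some (i + k))
        let counts1 :=
          if counts.contains g then counts
          else counts.insert g (states.foldl (fun d s => d.insert s 0) PySem.Dict.empty)
        if i + k < n then
          counts1.modify g PySem.Dict.empty
            (fun d => d.modify (PySem.List.pyGetD seq (i + k) "") 0 (· + 1))
        else counts1)
      PySem.Dict.empty
  counts.items.map (fun p => (pyReprStrList p.1, p.2.items))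

-- ===== PRECONDITION & SPEC =====
-- Pre_ excludes exactly the inputs on which the Python A raises (IndexError: for k < -len(sequence)
-- the successor lookup seq[i+k] hits a negative index below -len); B raises there as well.
def Pre_create_transition_matrix (sequence : List Int) (k : Int) : Prop :=
  -(sequence.length : Int) ≤ k
instance (sequence : List Int) (k : Int) : Decidable (Pre_create_transition_matrix sequence k) := by
  unfold Pre_create_transition_matrix; infer_instance
def pvWitness_create_transition_matrix : List Int × Int := ([1, 2, 1], 1)

def Spec_create_transition_matrix (sequence : List Int) (k : Int) (out : List (String × List (String × Int))) : Prop := out = create_transition_matrix_alt sequence k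
instance (sequence : List Int) (k : Int) (out : List (String × List (String × Int))) : Decidable (Spec_create_transition_matrix sequence k out) := by unfold Spec_create_transition_matrix; infer_instance

-- ===== CLAIM (what is proved, stated in full; the proofs are below) =====
def Claim_equal_create_transition_matrix : Prop := ∀ (sequence : List Int) (k : Int), Dom_create_transition_matrix sequence k → Pre_create_transition_matrix sequence k → Spec_create_transition_matrix sequence k (create_transition_matrix sequence k)

-- ===== LEMMAS AND PROOFS =====

-- ---- proof-layer abbreviations (folded into goals via the rfl-lemmas below) ----
def pvGram (S : List String) (k i : Int) : List String :=
  PySem.List.slice S (some i) (some (i + k))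
def pvSucc (S : List String) (k i : Int) : String :=
  PySem.List.pyGetD S (i + k) ""
def pvZero (states : List String) : PySem.Dict String Int :=
  states.foldl (fun d s => d.insert s 0) PySem.Dict.empty
def pvBump (d : PySem.Dict String Int) (x : String) : PySem.Dict String Int :=
  d.modify x 0 (· + 1)
def pvInner (states S : List String) (k n : Int) (is : List Int) (g : List String) :
    PySem.Dict String Int :=
  ((is.filter (fun i => (pvGram S k i == g) && decide (i + k < n))).map (pvSucc S k)).foldl
    pvBump (pvZero states)

theorem pvGram_def (S : List String) (k i : Int) :
    PySem.List.slice S (some i) (some (i + k)) = pvGram S k i := rfl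
theorem pvSucc_def (S : List String) (k i : Int) :
    PySem.List.pyGetD S (i + k) "" = pvSucc S k i := rfl
theorem pvZero_def (states : List String) :
    states.foldl (fun d s => d.insert s 0) PySem.Dict.empty = pvZero states := rfl
theorem pvBump_def (d : PySem.Dict String Int) (x : String) :
    d.modify x 0 (· + 1) = pvBump d x := rfl

-- the common normal form both ports are reduced to
def pvSpec (sequence : List Int) (k : Int) : List (String × List (String × Int)) :=
  (PySem.Set.ofList
      ((PySem.List.pyRange 0 ((sequence.length : Int) - k + 1) 1).map
        (pvGram (sequence.map (fun item => PySem.Int.toStr item)) k))).map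
    (fun g =>
      (pyReprStrList g,
        (pvInner ((PySem.Set.ofList sequence).map PySem.Int.toStr)
            (sequence.map (fun item => PySem.Int.toStr item)) k (sequence.length : Int)
            (PySem.List.pyRange 0 ((sequence.length : Int) - k + 1) 1) g).items))

-- ---- injectivity of pyReprStrList on quote-free strings ----
set_option maxHeartbeats 1000000 in
theorem digitChar_ne_quote (d : Nat) : Nat.digitChar d ≠ '\'' := by
  rcases Nat.lt_or_ge d 16 with hd | hd
  · interval_cases d <;> decide
  · unfold Nat.digitChar
    rw [if_neg (by omega)]
    rw [if_neg (by omega)]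
    rw [if_neg (by omega)]
    rw [if_neg (by omega)]
    rw [if_neg (by omega)]
    rw [if_neg (by omega)]
    rw [if_neg (by omega)]
    rw [if_neg (by omega)]
    rw [if_neg (by omega)]
    rw [if_neg (by omega)]
    rw [if_neg (by omega)]
    rw [if_neg (by omega)]
    rw [if_neg (by omega)]
    rw [if_neg (by omega)]
    rw [if_neg (by omega)]
    rw [if_neg (by omega)]
    decide

theorem toDigitsCore_no_quote (b : Nat) :
    ∀ (f m : Nat) (acc : List Char), (∀ c ∈ acc, c ≠ '\'') →
      ∀ c ∈ Nat.toDigitsCore b f m acc, c ≠ '\'' := by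
  intro f
  induction f with
  | zero =>
    intro m acc h c hc
    simp only [Nat.toDigitsCore] at hc
    exact h c hc
  | succ f ih =>
    intro m acc h c hc
    simp only [Nat.toDigitsCore] at hc
    by_cases hz : m / b = 0
    · rw [if_pos hz] at hc
      rcases List.mem_cons.mp hc with hc | hc
      · exact hc ▸ digitChar_ne_quote _
      · exact h c hc
    · rw [if_neg hz] at hc
      refine ih (m / b) (Nat.digitChar (m % b) :: acc) ?_ c hc
      intro c' hc'
      rcases List.mem_cons.mp hc' with hc' | hc'
      · exact hc' ▸ digitChar_ne_quote _
      · exact h c' hc'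

theorem toChars_no_quote (x : Int) : ∀ c ∈ PySem.Int.toChars x, c ≠ '\'' := by
  intro c hc
  unfold PySem.Int.toChars at hc
  split at hc
  · rcases List.mem_cons.mp hc with hc | hc
    · subst hc; decide
    · exact toDigitsCore_no_quote 10 _ _ [] (by simp) c hc
  · exact toDigitsCore_no_quote 10 _ _ [] (by simp) c hc

theorem tok_ext :
    ∀ (a b r s : List Char), (∀ c ∈ a, c ≠ '\'') → (∀ c ∈ b, c ≠ '\'') →
      a ++ '\'' :: r = b ++ '\'' :: s → a = b ∧ r = s := by
  intro a
  induction a with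
  | nil =>
    intro b r s _ hb h
    cases b with
    | nil => simpa using h
    | cons y ys =>
      exfalso
      simp only [List.nil_append, List.cons_append, List.cons.injEq] at h
      exact hb y List.mem_cons_self h.1.symm
  | cons x xs ih =>
    intro b r s ha hb h
    cases b with
    | nil =>
      exfalso
      simp only [List.nil_append, List.cons_append, List.cons.injEq] at h
      exact ha x List.mem_cons_self h.1
    | cons y ys =>
      simp only [List.cons_append, List.cons.injEq] at h
      obtain ⟨hxy, h'⟩ := h
      obtain ⟨h1, h2⟩ := ih ys r s (fun c hc => ha c (List.mem_cons_of_mem _ hc))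
        (fun c hc => hb c (List.mem_cons_of_mem _ hc)) h'
      exact ⟨by rw [hxy, h1], h2⟩

theorem join_quote_inj :
    ∀ (ss ts : List (List Char)),
      (∀ s ∈ ss, ∀ c ∈ s, c ≠ '\'') → (∀ t ∈ ts, ∀ c ∈ t, c ≠ '\'') →
      PySem.Chars.join [',', ' '] (ss.map (fun s => '\'' :: s ++ ['\''])) =
        PySem.Chars.join [',', ' '] (ts.map (fun t => '\'' :: t ++ ['\''])) →
      ss = ts := by
  intro ss
  induction ss with
  | nil =>
    intro ts _ _ h
    cases ts with
    | nil => rfl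
    | cons t ts =>
      exfalso
      cases ts with
      | nil =>
        rw [List.map_nil, List.map_cons, List.map_nil, PySem.Chars.join_nil,
          PySem.Chars.join_singleton] at h
        exact absurd h.symm (by simp)
      | cons t2 ts =>
        rw [List.map_nil, List.map_cons, List.map_cons, PySem.Chars.join_nil,
          PySem.Chars.join_cons_cons] at h
        exact absurd h.symm (by simp)
  | cons s ss ih =>
    intro ts hs ht h
    cases ts with
    | nil =>
      exfalso
      cases ss with
      | nil =>
        rw [List.map_nil, List.map_cons, List.map_nil, PySem.Chars.join_nil,
          PySem.Chars.join_singleton] at h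
        exact absurd h (by simp)
      | cons s2 ss =>
        rw [List.map_nil, List.map_cons, List.map_cons, PySem.Chars.join_nil,
          PySem.Chars.join_cons_cons] at h
        exact absurd h (by simp)
    | cons t ts =>
      have hs0 : ∀ c ∈ s, c ≠ '\'' := hs s List.mem_cons_self
      have ht0 : ∀ c ∈ t, c ≠ '\'' := ht t List.mem_cons_self
      cases ss with
      | nil =>
        cases ts with
        | nil =>
          rw [List.map_cons, List.map_nil, List.map_cons, List.map_nil,
            PySem.Chars.join_singleton, PySem.Chars.join_singleton] at h
          simp only [List.cons_append, List.cons.injEq] at h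
          obtain ⟨h1, -⟩ := tok_ext s t [] [] hs0 ht0 (by simpa using h)
          rw [h1]
        | cons t2 ts =>
          exfalso
          rw [List.map_cons, List.map_nil, List.map_cons, List.map_cons,
            PySem.Chars.join_singleton, PySem.Chars.join_cons_cons] at h
          simp only [List.cons_append, List.append_assoc, List.cons.injEq] at h
          obtain ⟨-, h2⟩ := tok_ext s t _ _ hs0 ht0 (by simpa using h)
          simp at h2
      | cons s2 ss' =>
        cases ts with
        | nil =>
          exfalso
          rw [List.map_cons, List.map_cons, List.map_cons, List.map_nil,
            PySem.Chars.join_cons_cons, PySem.Chars.join_singleton] at h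
          simp only [List.cons_append, List.append_assoc, List.cons.injEq] at h
          obtain ⟨-, h2⟩ := tok_ext s t _ _ hs0 ht0 (by simpa using h)
          simp at h2
        | cons t2 ts' =>
          rw [List.map_cons, List.map_cons, List.map_cons, List.map_cons,
            PySem.Chars.join_cons_cons, PySem.Chars.join_cons_cons] at h
          simp only [List.cons_append, List.append_assoc, List.cons.injEq] at h
          obtain ⟨h1, h2⟩ := tok_ext s t _ _ hs0 ht0 (by simpa using h)
          simp only [List.cons.injEq] at h2
          have := ih (t2 :: ts') (fun u hu => hs u (List.mem_cons_of_mem _ hu))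
            (fun u hu => ht u (List.mem_cons_of_mem _ hu))
            (by rw [List.map_cons, List.map_cons]; exact h2.2.2)
          rw [h1, this]

theorem pyReprStrList_inj (ss ts : List String)
    (hs : ∀ s ∈ ss, ∀ c ∈ s.toList, c ≠ '\'')
    (ht : ∀ t ∈ ts, ∀ c ∈ t.toList, c ≠ '\'') :
    pyReprStrList ss = pyReprStrList ts → ss = ts := by
  intro h
  unfold pyReprStrList at h
  have h2 := congrArg String.toList h
  simp only [String.toList_ofList] at h2
  injection h2 with h2a h2b
  have h3 : PySem.Chars.join [',', ' '] (ss.map (fun s => '\'' :: s.toList ++ ['\''])) =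
      PySem.Chars.join [',', ' '] (ts.map (fun t => '\'' :: t.toList ++ ['\''])) :=
    List.append_cancel_right h2b
  have h4 : ss.map String.toList = ts.map String.toList := by
    apply join_quote_inj
    · intro s hsm
      obtain ⟨s0, hs0, rfl⟩ := List.mem_map.mp hsm
      exact hs s0 hs0
    · intro t htm
      obtain ⟨t0, ht0, rfl⟩ := List.mem_map.mp htm
      exact ht t0 ht0
    · simpa [List.map_map, Function.comp] using h3
  have hinj : Function.Injective String.toList := by
    intro u v huv
    have h1 : String.ofList u.toList = String.ofList v.toList := by rw [huv]
    rw [String.ofList_toList, String.ofList_toList] at h1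
    exact h1
  exact List.map_injective_iff.mpr hinj h4

-- every element of a k-gram is some str(int), hence quote-free
theorem grams_quote_free (sequence : List Int) (k : Int) (g : List String)
    (hg : g ∈ PySem.Set.ofList
      ((PySem.List.pyRange 0 ((sequence.length : Int) - k + 1) 1).map
        (pvGram (sequence.map (fun item => PySem.Int.toStr item)) k))) :
    ∀ s ∈ g, ∀ c ∈ s.toList, c ≠ '\'' := by
  intro s hsg c hc
  have hg' := (PySem.Set.mem_ofList _ _).mp hg
  obtain ⟨i, -, rfl⟩ := List.mem_map.mp hg'
  have hsS := PySem.List.mem_of_mem_slice _ _ _ hsg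
  obtain ⟨z, -, rfl⟩ := List.mem_map.mp hsS
  rw [PySem.Int.toList_toStr] at hc
  exact toChars_no_quote z c hc

theorem repr_nodup (sequence : List Int) (k : Int) :
    ((PySem.Set.ofList
        ((PySem.List.pyRange 0 ((sequence.length : Int) - k + 1) 1).map
          (pvGram (sequence.map (fun item => PySem.Int.toStr item)) k))).map
      pyReprStrList).Nodup := by
  apply List.Nodup.map_on _ (PySem.Set.nodup_ofList _)
  intro x hx y hy hxy
  exact pyReprStrList_inj x y (grams_quote_free sequence k x hx)
    (grams_quote_free sequence k y hy) hxy

-- ---- dict plumbing ----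
theorem map_ite_eq_self {κ ν : Type} [BEq κ] (xs : List (κ × ν)) (c : κ) (q : κ × ν)
    (h : ∀ p ∈ xs, (p.1 == c) = false) :
    xs.map (fun p => if p.1 == c then q else p) = xs := by
  conv_rhs => rw [← List.map_id xs]
  apply List.map_congr_left
  intro p hp
  simp [h p hp]

-- inserting along the key list of a dict overwrites every entry in place
theorem items_overwrite {κ ν α : Type} [BEq κ] [LawfulBEq κ] (key : α → κ) (v w : α → ν) :
    ∀ (l : List α) (pre : List (κ × ν)),
      (pre.map Prod.fst ++ l.map key).Nodup →
      (l.foldl (fun m a => m.insert (key a) (v a))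
        (PySem.Dict.mk (pre ++ l.map (fun a => (key a, w a))))).items
        = pre ++ l.map (fun a => (key a, v a)) := by
  intro l
  induction l with
  | nil => intro pre _; simp
  | cons a l ih =>
    intro pre h
    have hka1 : key a ∉ pre.map Prod.fst := fun hmem =>
      List.disjoint_of_nodup_append h hmem List.mem_cons_self
    have hka2 : key a ∉ l.map key := (List.nodup_cons.mp (List.nodup_append.mp h).2.1).1
    have hct : (PySem.Dict.mk (pre ++ (a :: l).map (fun a => (key a, w a)))).contains (key a)
        = true := by
      rw [PySem.Dict.contains_mk]
      simp
    have hstep : (PySem.Dict.mk (pre ++ (a :: l).map fun a => (key a, w a))).insert (key a) (v a)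
        = PySem.Dict.mk ((pre ++ [(key a, v a)]) ++ l.map (fun a => (key a, w a))) := by
      apply PySem.Dict.ext
      rw [PySem.Dict.items_insert_of_contains _ _ hct]
      show (pre ++ (a :: l).map fun a => (key a, w a)).map
          (fun p => if p.1 == key a then (key a, v a) else p) = _
      rw [List.map_cons, List.map_append, List.map_cons]
      rw [map_ite_eq_self pre _ _ (by
        intro p hp
        exact beq_eq_false_iff_ne.mpr (fun he => hka1 (he ▸ List.mem_map_of_mem hp)))]
      rw [List.map_map]
      have hrest : l.map ((fun p => if p.1 == key a then (key a, v a) else p) ∘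
          (fun a => (key a, w a))) = l.map (fun a => (key a, w a)) := by
        apply List.map_congr_left
        intro b hb
        have : (key b == key a) = false :=
          beq_eq_false_iff_ne.mpr (fun he => hka2 (he ▸ List.mem_map_of_mem hb))
        simp [Function.comp, this]
      rw [hrest]
      simp
    rw [List.foldl_cons, hstep, ih (pre ++ [(key a, v a)]) (by
      simpa [List.map_append, List.append_assoc] using h)]
    simp

theorem items_overwrite₀ {κ ν α : Type} [BEq κ] [LawfulBEq κ] (key : α → κ) (v w : α → ν)
    (l : List α) (h : (l.map key).Nodup) :
    (l.foldl (fun m a => m.insert (key a) (v a))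
      (PySem.Dict.mk (l.map (fun a => (key a, w a))))).items
      = l.map (fun a => (key a, v a)) := by
  simpa using items_overwrite key v w l [] (by simpa using h)

-- ---- the per-gram counter ----
theorem pvInner_append (states S : List String) (k n : Int) (is : List Int) (i : Int)
    (g : List String) :
    pvInner states S k n (is ++ [i]) g =
      if (pvGram S k i == g) && decide (i + k < n) then
        pvBump (pvInner states S k n is g) (pvSucc S k i)
      else pvInner states S k n is g := by
  unfold pvInner
  rw [List.filter_append]
  cases hpi : ((pvGram S k i == g) && decide (i + k < n)) with
  | false => simp [hpi]
  | true => simp [hpi]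

theorem pvInner_not_mem (states S : List String) (k n : Int) (is : List Int) (g : List String)
    (h : ∀ i ∈ is, pvGram S k i ≠ g) :
    pvInner states S k n is g = pvZero states := by
  unfold pvInner
  rw [List.filter_eq_nil_iff.mpr (by intro i hi; simp [h i hi])]
  simp

theorem filter_range_eq (S : List String) (k n : Int) (item : List String) :
    (PySem.List.pyRange 0 (n - k) 1).filter (fun i => decide (pvGram S k i = item))
      = (PySem.List.pyRange 0 (n - k + 1) 1).filter
          (fun i => (pvGram S k i == item) && decide (i + k < n)) := by
  by_cases h : 0 ≤ n - k
  · rw [PySem.List.pyRange_one_succ_right h, List.filter_append]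
    have hlast : List.filter (fun i => (pvGram S k i == item) && decide (i + k < n)) [n - k]
        = [] := by
      simp
    rw [hlast, List.append_nil]
    apply List.filter_congr
    intro i hi
    have hi2 : i < n - k := (PySem.List.mem_pyRange_one.mp hi).2
    have hik : i + k < n := by omega
    by_cases hgi : pvGram S k i = item
    · simp [hgi, hik]
    · simp [hgi, hik, beq_eq_false_iff_ne.mpr hgi]
  · rw [PySem.List.pyRange_one_eq_nil (by omega : n - k ≤ 0),
      PySem.List.pyRange_one_eq_nil (by omega : n - k + 1 ≤ 0)]
    rfl

-- A's inner loop (one rescan of the whole sequence for a fixed k-gram) computes pvInner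
theorem dval_eq (sequence : List Int) (k : Int) (item : List String) :
    (PySem.List.pyRange 0 ((sequence.length : Int) - k) 1).foldl
      (fun d i =>
        if pvGram (sequence.map (fun item => PySem.Int.toStr item)) k i = item then
          pvBump d (pvSucc (sequence.map (fun item => PySem.Int.toStr item)) k i)
        else d)
      ((PySem.Set.ofList sequence).foldl
        (fun d el => d.insert (PySem.Int.toStr el) 0) PySem.Dict.empty)
      = pvInner ((PySem.Set.ofList sequence).map PySem.Int.toStr)
          (sequence.map (fun item => PySem.Int.toStr item)) k (sequence.length : Int)
          (PySem.List.pyRange 0 ((sequence.length : Int) - k + 1) 1) item := by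
  have hz : (PySem.Set.ofList sequence).foldl
      (fun d el => d.insert (PySem.Int.toStr el) 0) PySem.Dict.empty
      = pvZero ((PySem.Set.ofList sequence).map PySem.Int.toStr) := by
    unfold pvZero
    exact (List.foldl_map (f := PySem.Int.toStr) (g := fun (d : PySem.Dict String Int) (s : String) => d.insert s 0)).symm
  rw [hz,
    PySem.List.foldl_ite_eq_foldl_filter
      (fun i => pvGram (sequence.map (fun item => PySem.Int.toStr item)) k i = item)
      (fun d i => pvBump d (pvSucc (sequence.map (fun item => PySem.Int.toStr item)) k i)),
    filter_range_eq]
  exact List.foldl_map.symm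

-- ---- the one-pass loop invariant for B ----
theorem B_inv (S states : List String) (k n : Int) (is : List Int) :
    is.foldl
      (fun counts i =>
        if i + k < n then
          (if counts.contains (pvGram S k i) then counts
            else counts.insert (pvGram S k i) (pvZero states)).modify (pvGram S k i)
            PySem.Dict.empty (fun d => pvBump d (pvSucc S k i))
        else
          (if counts.contains (pvGram S k i) then counts
            else counts.insert (pvGram S k i) (pvZero states)))
      PySem.Dict.empty
      = PySem.Dict.mk
          ((PySem.Set.ofList (is.map (pvGram S k))).map
            (fun g => (g, pvInner states S k n is g))) := by
  induction is using List.reverseRecOn with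
  | nil => rfl
  | append_singleton is i ih =>
    rw [List.foldl_append, ih, List.foldl_cons, List.foldl_nil, List.map_append,
      List.map_cons, List.map_nil, PySem.Set.ofList_append_singleton]
    set U := PySem.Set.ofList (is.map (pvGram S k)) with hU
    have hnodU : U.Nodup := by rw [hU]; exact PySem.Set.nodup_ofList _
    have hkeys : (PySem.Dict.mk (U.map fun g => (g, pvInner states S k n is g))).keys = U := by
      rw [PySem.Dict.keys_mk, List.map_map,
        show ((fun (x : List String × PySem.Dict String Int) => x.1) ∘
          fun g => (g, pvInner states S k n is g)) = fun g : List String => g from rfl,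
        List.map_id']
    by_cases hmem : pvGram S k i ∈ U
    · rw [PySem.Set.add_of_mem hmem]
      have hct : (PySem.Dict.mk (U.map fun g => (g, pvInner states S k n is g))).contains
          (pvGram S k i) = true := by
        rw [PySem.Dict.contains_mk, List.any_map, List.any_eq_true]
        exact ⟨_, hmem, by simp⟩
      have hgd : (PySem.Dict.mk (U.map fun g => (g, pvInner states S k n is g))).getD
          (pvGram S k i) PySem.Dict.empty = pvInner states S k n is (pvGram S k i) :=
        PySem.Dict.getD_of_mem_items _
          (show (pvGram S k i, pvInner states S k n is (pvGram S k i)) ∈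
              (PySem.Dict.mk (U.map fun g => (g, pvInner states S k n is g))).items from
            List.mem_map_of_mem hmem)
          (by rw [hkeys]; exact hnodU) _
      by_cases hg : i + k < n
      · rw [if_pos hg, if_pos hct]
        simp only [PySem.Dict.modify]
        rw [hgd]
        apply PySem.Dict.ext
        rw [PySem.Dict.items_insert_of_contains _ _ hct]
        show (U.map fun g => (g, pvInner states S k n is g)).map _ = _
        rw [List.map_map]
        apply List.map_congr_left
        intro g hgU
        by_cases hgg : g = pvGram S k i
        · subst hgg
          simp [pvInner_append, hg]
        · have hb2 : (pvGram S k i == g) = false := beq_eq_false_iff_ne.mpr (Ne.symm hgg)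
          simp [pvInner_append, hb2, hgg]
      · rw [if_neg hg, if_pos hct]
        apply congrArg
        apply List.map_congr_left
        intro g hgU
        rw [pvInner_append]
        simp [hg]
    · rw [PySem.Set.add_of_not_mem hmem]
      have hct : (PySem.Dict.mk (U.map fun g => (g, pvInner states S k n is g))).contains
          (pvGram S k i) = false := by
        rw [PySem.Dict.contains_mk, List.any_map, List.any_eq_false]
        intro g hgU
        have hne : g ≠ pvGram S k i := fun he => hmem (he ▸ hgU)
        simp [hne]
      have hnotg : ∀ i' ∈ is, pvGram S k i' ≠ pvGram S k i := by
        intro i' hi' he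
        apply hmem
        rw [hU]
        refine (PySem.Set.mem_ofList _ _).mpr ?_
        rw [← he]
        exact List.mem_map_of_mem hi'
      have hFz : pvInner states S k n is (pvGram S k i) = pvZero states :=
        pvInner_not_mem _ _ _ _ _ _ hnotg
      have hins : (PySem.Dict.mk (U.map fun g => (g, pvInner states S k n is g))).insert
          (pvGram S k i) (pvZero states)
          = PySem.Dict.mk ((U.map fun g => (g, pvInner states S k n is g))
              ++ [(pvGram S k i, pvZero states)]) := by
        apply PySem.Dict.ext
        rw [PySem.Dict.items_insert_of_not_contains _ _ hct]
      have hctF : ¬ ((PySem.Dict.mk (U.map fun g => (g, pvInner states S k n is g))).contains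
          (pvGram S k i) = true) := by rw [hct]; simp
      by_cases hg : i + k < n
      · rw [if_pos hg, if_neg hctF]
        simp only [PySem.Dict.modify]
        rw [PySem.Dict.getD_insert_self, PySem.Dict.insert_insert_self]
        apply PySem.Dict.ext
        rw [PySem.Dict.items_insert_of_not_contains _ _ hct, List.map_append]
        congr 1
        · apply List.map_congr_left
          intro g hgU
          have hne : g ≠ pvGram S k i := fun he => hmem (he ▸ hgU)
          have hb2 : (pvGram S k i == g) = false := beq_eq_false_iff_ne.mpr (Ne.symm hne)
          simp [pvInner_append, hb2]
        · simp [pvInner_append, hg, hFz]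
      · rw [if_neg hg, if_neg hctF, hins]
        apply congrArg
        rw [List.map_append]
        congr 1
        · apply List.map_congr_left
          intro g hgU
          rw [pvInner_append]
          simp [hg]
        · simp [pvInner_append, hg, hFz]

-- ---- each port equals the normal form ----
theorem A_eq (sequence : List Int) (k : Int) :
    create_transition_matrix sequence k = pvSpec sequence k := by
  unfold create_transition_matrix
  simp only [List.length_map, pvGram_def, pvSucc_def, pvBump_def]
  rw [PySem.List.foldl_append_singleton_eq_map
    (fun i => pvGram (sequence.map (fun item => PySem.Int.toStr item)) k i)]
  rw [List.nil_append]
  rw [PySem.List.foldl_congr_mem _ _ PySem.Set.add _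
    (fun acc x _ => (PySem.Set.add_eq_ite acc x).symm)]
  rw [← PySem.Set.ofList_eq_foldl]
  have hrnd := repr_nodup sequence k
  have h0 : (PySem.Set.ofList
        ((PySem.List.pyRange 0 ((sequence.length : Int) - k + 1) 1).map
          (fun i => pvGram (sequence.map (fun item => PySem.Int.toStr item)) k i))).foldl
      (fun m item => m.insert (pyReprStrList item) []) PySem.Dict.empty
      = PySem.Dict.mk
          ((PySem.Set.ofList
              ((PySem.List.pyRange 0 ((sequence.length : Int) - k + 1) 1).map
                (fun i => pvGram (sequence.map (fun item => PySem.Int.toStr item)) k i))).map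
            (fun a => (pyReprStrList a, ([] : List (String × Int))))) := by
    apply PySem.Dict.ext
    rw [PySem.Dict.items_foldl_insert_fresh _ pyReprStrList _ _
      (fun a _ => PySem.Dict.contains_empty _) hrnd]
    rfl
  rw [h0]
  rw [PySem.List.foldl_congr_mem _ _
    (fun m item => m.insert (pyReprStrList item)
      ((pvInner ((PySem.Set.ofList sequence).map PySem.Int.toStr)
          (sequence.map (fun item => PySem.Int.toStr item)) k (sequence.length : Int)
          (PySem.List.pyRange 0 ((sequence.length : Int) - k + 1) 1) item).items)) _
    (fun acc item _ => by rw [dval_eq])]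
  rw [items_overwrite₀ pyReprStrList
    (v := fun item => (pvInner ((PySem.Set.ofList sequence).map PySem.Int.toStr)
      (sequence.map (fun item => PySem.Int.toStr item)) k (sequence.length : Int)
      (PySem.List.pyRange 0 ((sequence.length : Int) - k + 1) 1) item).items)
    (w := fun _ => []) _ hrnd]
  rfl

theorem B_eq (sequence : List Int) (k : Int) :
    create_transition_matrix_alt sequence k = pvSpec sequence k := by
  unfold create_transition_matrix_alt
  simp only [List.length_map, PySem.List.dedup_eq_ofList, pvGram_def, pvSucc_def, pvBump_def,
    pvZero_def]
  rw [B_inv]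
  show ((PySem.Set.ofList _).map _).map _ = _
  rw [List.map_map]
  rfl

-- ===== VERDICT (by name: the statement is the Claim_ definition above) =====
theorem create_transition_matrix_spec : Claim_equal_create_transition_matrix := by
  intro sequence k _hdom _hpre
  show create_transition_matrix sequence k = create_transition_matrix_alt sequence k
  rw [A_eq, B_eq]
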